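-- pv_equiv track=rewrite | github.com/XFALCONS38/IDE | IDE.py | _build_code_mask
-- ===== SOURCE A (Python) =====
-- def _build_code_mask(text):
--     mask = [True] * len(text)
--     i = 0
--     in_single = False
--     in_multi = False
--     in_string = False
--     in_char = False
--     escape = False
--
--     while i < len(text):
--         ch = text[i]
--         nxt = text[i + 1] if i + 1 < len(text) else ""
--
--         if in_single:
--             mask[i] = False
--             if ch == "\n":
--                 in_single = False
--             i += 1
--             continue
--
--         if in_multi:
--             mask[i] = False
--             if ch == "*" and nxt == "/":
--                 mask[i + 1] = False
--                 i += 2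
--                 in_multi = False
--             else:
--                 i += 1
--             continue
--
--         if in_string:
--             mask[i] = False
--             if escape:
--                 escape = False
--             else:
--                 if ch == "\\":
--                     escape = True
--                 elif ch == '"':
--                     in_string = False
--             i += 1
--             continue
--
--         if in_char:
--             mask[i] = False
--             if escape:
--                 escape = False
--             else:
--                 if ch == "\\":
--                     escape = True
--                 elif ch == "'":
--                     in_char = False
--             i += 1
--             continue
--
--         if ch == "/" and nxt == "/":
--             mask[i] = False
--             mask[i + 1] = False
--             in_single = True
--             i += 2
--             continue
--
--         if ch == "/" and nxt == "*":
--             mask[i] = False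
--             mask[i + 1] = False
--             in_multi = True
--             i += 2
--             continue
--
--         if ch == '"':
--             mask[i] = False
--             in_string = True
--             i += 1
--             continue
--
--         if ch == "'":
--             mask[i] = False
--             in_char = True
--             i += 1
--             continue
--
--         i += 1
--
--     return mask
-- ===== SOURCE B (Python) =====
-- def _find_char(text, c, j):
--     n = len(text)
--     while j < n:
--         if text[j] == c:
--             return j
--         j += 1
--     return None
--
--
-- def _find_pair(text, a, b, j):
--     n = len(text)
--     while j + 1 < n:
--         if text[j] == a and text[j + 1] == b:
--             return j
--         j += 1
--     return None
--
--
-- def _scan_quoted(text, q, j):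
--     n = len(text)
--     while j < n:
--         c = text[j]
--         if c == "\\":
--             j += 2
--         elif c == q:
--             return j + 1
--         else:
--             j += 1
--     return n
--
--
-- def _build_code_mask(text):
--     # Span-based: locate each token's end directly, blank the whole span, jump past it.
--     n = len(text)
--     mask = [True] * n
--     i = 0
--     while i < n:
--         ch = text[i]
--         if ch == "/" and i + 1 < n and text[i + 1] == "/":
--             j = _find_char(text, "\n", i + 2)
--             end = n if j is None else j + 1
--         elif ch == "/" and i + 1 < n and text[i + 1] == "*":
--             j = _find_pair(text, "*", "/", i + 2)
--             end = n if j is None else j + 2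
--         elif ch == '"' or ch == "'":
--             end = _scan_quoted(text, ch, i + 1)
--         else:
--             i += 1
--             continue
--         for k in range(i, end):
--             mask[k] = False
--         i = end
--     return mask
-- ===== Notes on version B (the rewrite author's own statement) =====
-- stated objective: faster
-- what changed: Replaced A's per-character state machine (five boolean flags threaded through one while loop) by a span-based scanner: at each token start it locates the token's end directly (newline / '*/' / escape-aware closing quote), blanks the whole span at once and jumps past it.
import Mathlib
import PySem

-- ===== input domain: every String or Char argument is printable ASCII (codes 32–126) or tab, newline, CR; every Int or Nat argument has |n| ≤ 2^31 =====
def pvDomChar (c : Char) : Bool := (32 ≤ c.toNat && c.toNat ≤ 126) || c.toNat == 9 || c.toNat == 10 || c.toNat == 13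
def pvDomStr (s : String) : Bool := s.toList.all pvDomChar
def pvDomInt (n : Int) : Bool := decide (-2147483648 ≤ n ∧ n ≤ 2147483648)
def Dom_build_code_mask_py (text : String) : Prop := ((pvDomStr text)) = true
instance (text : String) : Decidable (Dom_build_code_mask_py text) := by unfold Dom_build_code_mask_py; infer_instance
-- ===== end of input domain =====

-- B replaces A's flag-driven per-character state machine by a span-based scanner
-- (find each token's end, blank the span, jump); same values; a timing run measured B faster.

-- ===== PORT A =====
-- text[i] for 0 ≤ i < len(text): exact there (both ports only read in-range indices).
def pyAt (s : List Char) (i : Nat) : Char := s.getD i ' '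

-- tiny termination lemmas cited by name in the ports' decreasing_by
theorem pvSub2 (n i : Nat) (h : i < n) : n - (i + 2) < n - i :=
  Nat.lt_of_le_of_lt (Nat.sub_le_sub_left (Nat.le_succ (i + 1)) n) (Nat.sub_succ_lt_self n i h)

-- Transliteration of A's while loop: the five state flags and the index are the
-- recursion state; text[i] with i < n is exact as pyAt s i; nxt is an
-- Option Char (none plays Python's ""), so `nxt == "/"` becomes `nxt = some '/'`.
def buildAGo (s : List Char) (n : Nat)
    (inSingle inMulti inString inChar escape : Bool)
    (i : Nat) (mask : List Bool) : List Bool :=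
  if h : i < n then
    let ch := pyAt s i
    let nxt : Option Char := if i + 1 < n then some (pyAt s (i + 1)) else none
    if inSingle then
      buildAGo s n (if ch = '\n' then false else inSingle) inMulti inString inChar escape
        (i + 1) (mask.set i false)
    else if inMulti then
      if ch = '*' ∧ nxt = some '/' then
        buildAGo s n inSingle false inString inChar escape
          (i + 2) ((mask.set i false).set (i + 1) false)
      else
        buildAGo s n inSingle inMulti inString inChar escape (i + 1) (mask.set i false)
    else if inString then
      if escape then
        buildAGo s n inSingle inMulti inString inChar false (i + 1) (mask.set i false)
      else if ch = '\\' then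
        buildAGo s n inSingle inMulti inString inChar true (i + 1) (mask.set i false)
      else if ch = '"' then
        buildAGo s n inSingle inMulti false inChar escape (i + 1) (mask.set i false)
      else
        buildAGo s n inSingle inMulti inString inChar escape (i + 1) (mask.set i false)
    else if inChar then
      if escape then
        buildAGo s n inSingle inMulti inString inChar false (i + 1) (mask.set i false)
      else if ch = '\\' then
        buildAGo s n inSingle inMulti inString inChar true (i + 1) (mask.set i false)
      else if ch = '\'' then
        buildAGo s n inSingle inMulti inString false escape (i + 1) (mask.set i false)
      else
        buildAGo s n inSingle inMulti inString inChar escape (i + 1) (mask.set i false)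
    else if ch = '/' ∧ nxt = some '/' then
      buildAGo s n true inMulti inString inChar escape
        (i + 2) ((mask.set i false).set (i + 1) false)
    else if ch = '/' ∧ nxt = some '*' then
      buildAGo s n inSingle true inString inChar escape
        (i + 2) ((mask.set i false).set (i + 1) false)
    else if ch = '"' then
      buildAGo s n inSingle inMulti true inChar escape (i + 1) (mask.set i false)
    else if ch = '\'' then
      buildAGo s n inSingle inMulti inString true escape (i + 1) (mask.set i false)
    else
      buildAGo s n inSingle inMulti inString inChar escape (i + 1) mask
  else mask
termination_by n - i
decreasing_by
  all_goals first
    | exact Nat.sub_succ_lt_self n i h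
    | exact pvSub2 n i h

def build_code_mask_py (text : String) : List Bool :=
  let s := text.toList
  buildAGo s s.length false false false false false 0 (List.replicate s.length true)

-- ===== PORT B =====
-- Hand port of Source B's _find_char loop (exact, step for step).
def findCharFrom (s : List Char) (n : Nat) (c : Char) (j : Nat) : Option Nat :=
  if h : j < n then
    if pyAt s j = c then some j else findCharFrom s n c (j + 1)
  else none
termination_by n - j
decreasing_by exact Nat.sub_succ_lt_self n j h

-- Hand port of Source B's _find_pair loop (exact, step for step).
def findPairFrom (s : List Char) (n : Nat) (a b : Char) (j : Nat) : Option Nat :=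
  if h : j + 1 < n then
    if pyAt s j = a ∧ pyAt s (j + 1) = b then some j else findPairFrom s n a b (j + 1)
  else none
termination_by n - j
decreasing_by exact Nat.sub_succ_lt_self n j (Nat.lt_of_succ_lt h)

-- Hand port of Source B's _scan_quoted loop (exact, step for step).
def scanQuoted (s : List Char) (n : Nat) (q : Char) (j : Nat) : Nat :=
  if h : j < n then
    let c := pyAt s j
    if c = '\\' then scanQuoted s n q (j + 2)
    else if c = q then j + 1
    else scanQuoted s n q (j + 1)
  else n
termination_by n - j
decreasing_by
  all_goals first
    | exact Nat.sub_succ_lt_self n j h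
    | exact pvSub2 n j h

-- Exact port of B's `for k in range(i, end): mask[k] = False` (i, end : Nat; empty when end ≤ i).
def maskRange (mask : List Bool) (i e : Nat) : List Bool :=
  (List.range' i (e - i)).foldl (fun m k => m.set k false) mask

-- termination helpers for buildBGo (cited in decreasing_by)
theorem findCharFrom_ge (s : List Char) (n : Nat) (c : Char) :
    ∀ j k, findCharFrom s n c j = some k → j ≤ k := by
  intro j
  induction hfuel : n - j using Nat.strong_induction_on generalizing j with
  | _ f ih =>
    intro k hk
    unfold findCharFrom at hk
    split at hk
    · split at hk
      · injection hk with hk; omega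
      · have := ih (n - (j + 1)) (by omega) (j + 1) rfl k hk
        omega
    · exact absurd hk (by simp)

theorem findPairFrom_ge (s : List Char) (n : Nat) (a b : Char) :
    ∀ j k, findPairFrom s n a b j = some k → j ≤ k := by
  intro j
  induction hfuel : n - j using Nat.strong_induction_on generalizing j with
  | _ f ih =>
    intro k hk
    unfold findPairFrom at hk
    split at hk
    · split at hk
      · injection hk with hk; omega
      · have := ih (n - (j + 1)) (by omega) (j + 1) rfl k hk
        omega
    · exact absurd hk (by simp)

theorem scanQuoted_ge (s : List Char) (n : Nat) (q : Char) :
    ∀ j, j ≤ scanQuoted s n q j ∨ scanQuoted s n q j = n := by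
  intro j
  induction hfuel : n - j using Nat.strong_induction_on generalizing j with
  | _ f ih =>
    unfold scanQuoted
    split
    · dsimp only
      split
      · rcases ih (n - (j + 2)) (by omega) (j + 2) rfl with h | h
        · left; omega
        · right; exact h
      · split
        · left; omega
        · rcases ih (n - (j + 1)) (by omega) (j + 1) rfl with h | h
          · left; omega
          · right; exact h
    · right; rfl

-- termination lemmas for buildBGo's jumps (cited by name in decreasing_by)
theorem decSingle (s : List Char) (n i : Nat) (h : i < n) :
    n - ((findCharFrom s n '\n' (i + 2)).elim n (· + 1)) < n - i := by
  rcases hf : findCharFrom s n '\n' (i + 2) with _ | k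
  · simp only [Option.elim]; omega
  · have := findCharFrom_ge s n '\n' (i + 2) k hf
    simp only [Option.elim]; omega

theorem decPair (s : List Char) (n i : Nat) (h : i < n) :
    n - ((findPairFrom s n '*' '/' (i + 2)).elim n (· + 2)) < n - i := by
  rcases hf : findPairFrom s n '*' '/' (i + 2) with _ | k
  · simp only [Option.elim]; omega
  · have := findPairFrom_ge s n '*' '/' (i + 2) k hf
    simp only [Option.elim]; omega

theorem decQuoted (s : List Char) (n : Nat) (q : Char) (i : Nat) (h : i < n) :
    n - scanQuoted s n q (i + 1) < n - i := by
  rcases scanQuoted_ge s n q (i + 1) with hg | hg <;> omega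

-- Transliteration of B's main while loop: find the token's end, blank the span, jump to it.
def buildBGo (s : List Char) (n : Nat) (i : Nat) (mask : List Bool) : List Bool :=
  if h : i < n then
    let ch := pyAt s i
    if h2 : ch = '/' ∧ i + 1 < n ∧ pyAt s (i + 1) = '/' then
      let e := (findCharFrom s n '\n' (i + 2)).elim n (· + 1)
      buildBGo s n e (maskRange mask i e)
    else if h3 : ch = '/' ∧ i + 1 < n ∧ pyAt s (i + 1) = '*' then
      let e := (findPairFrom s n '*' '/' (i + 2)).elim n (· + 2)
      buildBGo s n e (maskRange mask i e)
    else if h4 : ch = '"' ∨ ch = '\'' then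
      let e := scanQuoted s n ch (i + 1)
      buildBGo s n e (maskRange mask i e)
    else
      buildBGo s n (i + 1) mask
  else mask
termination_by n - i
decreasing_by
  · exact decSingle s n i h
  · exact decPair s n i h
  · exact decQuoted s n (pyAt s i) i h
  · exact Nat.sub_succ_lt_self n i h

def build_code_mask_py_alt (text : String) : List Bool :=
  let s := text.toList
  buildBGo s s.length 0 (List.replicate s.length true)

-- ===== PRECONDITION & SPEC =====
def Spec_build_code_mask_py (text : String) (out : List Bool) : Prop := out = build_code_mask_py_alt text
instance (text : String) (out : List Bool) : Decidable (Spec_build_code_mask_py text out) := by unfold Spec_build_code_mask_py; infer_instance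

-- ===== CLAIM (what is proved, stated in full; the proofs are below) =====
def Claim_equal_build_code_mask_py : Prop := ∀ (text : String), Dom_build_code_mask_py text → Spec_build_code_mask_py text (build_code_mask_py text)

-- ===== LEMMAS AND PROOFS =====

theorem maskRange_empty (m : List Bool) (i e : Nat) (h : e ≤ i) : maskRange m i e = m := by
  unfold maskRange
  have : e - i = 0 := by omega
  simp [this]

theorem maskRange_succ (m : List Bool) (i e : Nat) (h : i < e) :
    maskRange m i e = maskRange (m.set i false) (i + 1) e := by
  unfold maskRange
  have h1 : e - i = (e - (i + 1)) + 1 := by omega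
  rw [h1, List.range'_succ]
  simp [List.foldl]

theorem L_single (s : List Char) (n : Nat) :
    ∀ j mask, buildAGo s n true false false false false j mask
      = buildAGo s n false false false false false ((findCharFrom s n '\n' j).elim n (· + 1))
          (maskRange mask j ((findCharFrom s n '\n' j).elim n (· + 1))) := by
  intro j
  induction hfuel : n - j using Nat.strong_induction_on generalizing j with
  | _ f ih =>
  intro mask
  by_cases h : j < n
  · by_cases hc : pyAt s j = '\n'
    · have hfind : findCharFrom s n '\n' j = some j := by
        rw [findCharFrom]; simp [h, hc]
      rw [hfind]
      conv_lhs => rw [buildAGo]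
      simp only [dif_pos h, Option.elim]
      rw [maskRange_succ _ _ _ (by omega), maskRange_empty _ _ _ (by omega)]
      simp [hc]
    · have hfind : findCharFrom s n '\n' j = findCharFrom s n '\n' (j + 1) := by
        rw [findCharFrom]; simp [h, hc]
      conv_lhs => rw [buildAGo]
      simp only [dif_pos h]
      rw [if_neg hc]
      rw [ih (n - (j + 1)) (by omega) (j + 1) rfl (mask.set j false)]
      rw [hfind]
      have hje : j < (findCharFrom s n '\n' (j + 1)).elim n (· + 1) := by
        rcases hf2 : findCharFrom s n '\n' (j + 1) with _ | k
        · simpa using h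
        · have := findCharFrom_ge s n '\n' (j + 1) k hf2
          simp only [Option.elim]; omega
      conv_rhs => rw [maskRange_succ _ _ _ hje]
      simp
  · have hge : n ≤ j := by omega
    have hfind : findCharFrom s n '\n' j = none := by
      rw [findCharFrom]; simp [h]
    rw [hfind]
    simp only [Option.elim]
    rw [maskRange_empty _ _ _ (by omega)]
    conv_lhs => rw [buildAGo]
    conv_rhs => rw [buildAGo]
    simp [h]

theorem L_multi (s : List Char) (n : Nat) :
    ∀ j mask, buildAGo s n false true false false false j mask
      = buildAGo s n false false false false false ((findPairFrom s n '*' '/' j).elim n (· + 2))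
          (maskRange mask j ((findPairFrom s n '*' '/' j).elim n (· + 2))) := by
  intro j
  induction hfuel : n - j using Nat.strong_induction_on generalizing j with
  | _ f ih =>
  intro mask
  by_cases h : j < n
  · by_cases hm : pyAt s j = '*' ∧ j + 1 < n ∧ pyAt s (j + 1) = '/'
    · obtain ⟨h1, h2, h3⟩ := hm
      have hfind : findPairFrom s n '*' '/' j = some j := by
        rw [findPairFrom]; simp [h2, h1, h3]
      rw [hfind]
      conv_lhs => rw [buildAGo]
      simp only [dif_pos h, Option.elim]
      rw [maskRange_succ _ _ _ (by omega), maskRange_succ _ _ _ (by omega),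
        maskRange_empty _ _ _ (by omega)]
      simp [h1, h2, h3]
    · have hA : ¬(pyAt s j = '*' ∧ (if j + 1 < n then some (pyAt s (j + 1)) else none) = some '/') := by
        rintro ⟨a, b⟩
        by_cases h2 : j + 1 < n
        · rw [if_pos h2] at b; exact hm ⟨a, h2, by injection b⟩
        · rw [if_neg h2] at b; cases b
      have hfind : findPairFrom s n '*' '/' j = findPairFrom s n '*' '/' (j + 1) := by
        rw [findPairFrom]
        by_cases h2 : j + 1 < n
        · rw [dif_pos h2, if_neg fun ab => hm ⟨ab.1, h2, ab.2⟩]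
        · rw [dif_neg h2]
          rw [findPairFrom, dif_neg (show ¬ (j + 1 + 1 < n) by omega)]
      conv_lhs => rw [buildAGo]; simp [h, hA]
      rw [ih (n - (j + 1)) (by omega) (j + 1) rfl (mask.set j false)]
      rw [hfind]
      have hje : j < (findPairFrom s n '*' '/' (j + 1)).elim n (· + 2) := by
        rcases hf2 : findPairFrom s n '*' '/' (j + 1) with _ | k
        · simpa using h
        · have := findPairFrom_ge s n '*' '/' (j + 1) k hf2
          simp only [Option.elim]; omega
      conv_rhs => rw [maskRange_succ _ _ _ hje]
      rw [if_neg hm]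
  · have hfind : findPairFrom s n '*' '/' j = none := by
      rw [findPairFrom, dif_neg (show ¬ (j + 1 < n) by omega)]
    rw [hfind]
    simp only [Option.elim]
    rw [maskRange_empty _ _ _ (by omega)]
    conv_lhs => rw [buildAGo]
    conv_rhs => rw [buildAGo]
    simp [h]

theorem L_string (s : List Char) (n : Nat) :
    ∀ j mask, buildAGo s n false false true false false j mask
      = buildAGo s n false false false false false (scanQuoted s n '"' j)
          (maskRange mask j (scanQuoted s n '"' j)) := by
  intro j
  induction hfuel : n - j using Nat.strong_induction_on generalizing j with
  | _ f ih =>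
  intro mask
  by_cases h : j < n
  · by_cases hb : pyAt s j = '\\'
    · have hfind : scanQuoted s n '"' j = scanQuoted s n '"' (j + 2) := by
        rw [scanQuoted]; simp [h, hb]
      conv_lhs => rw [buildAGo]; simp [h, hb]
      by_cases h2 : j + 1 < n
      · conv_lhs => rw [buildAGo]; simp [h2]
        rw [ih (n - (j + 1 + 1)) (by omega) (j + 1 + 1) rfl ((mask.set j false).set (j + 1) false)]
        have h12 : j + 1 + 1 = j + 2 := by omega
        rw [h12, hfind]
        have hje : j + 1 < scanQuoted s n '"' (j + 2) := by
          rcases scanQuoted_ge s n '"' (j + 2) with hg | hg <;> omega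
        conv_rhs => rw [maskRange_succ _ _ _ (by omega : j < scanQuoted s n '"' (j + 2)),
          maskRange_succ _ _ _ hje]
      · have h3 : ¬ (j + 2 < n) := by omega
        have he : scanQuoted s n '"' (j + 2) = n := by
          rw [scanQuoted, dif_neg h3]
        rw [hfind, he]
        conv_lhs => rw [buildAGo]
        rw [dif_neg (show ¬ (j + 1 < n) from h2)]
        conv_rhs => rw [buildAGo]
        rw [dif_neg (show ¬ (n < n) by omega)]
        rw [maskRange_succ _ _ _ (by omega), maskRange_empty _ _ _ (by omega)]
    · by_cases hq : pyAt s j = '"'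
      · have hfind : scanQuoted s n '"' j = j + 1 := by
          rw [scanQuoted]; simp [h, hq]
        rw [hfind]
        conv_lhs => rw [buildAGo]; simp [h, hb, hq]
        rw [maskRange_succ _ _ _ (by omega), maskRange_empty _ _ _ (by omega)]
      · have hfind : scanQuoted s n '"' j = scanQuoted s n '"' (j + 1) := by
          rw [scanQuoted]; simp [h, hb, hq]
        conv_lhs => rw [buildAGo]; simp [h, hb, hq]
        rw [ih (n - (j + 1)) (by omega) (j + 1) rfl (mask.set j false)]
        rw [hfind]
        have hje : j < scanQuoted s n '"' (j + 1) := by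
          rcases scanQuoted_ge s n '"' (j + 1) with hg | hg <;> omega
        conv_rhs => rw [maskRange_succ _ _ _ hje]
  · have hfind : scanQuoted s n '"' j = n := by
      rw [scanQuoted, dif_neg h]
    rw [hfind]
    rw [maskRange_empty _ _ _ (by omega)]
    conv_lhs => rw [buildAGo]
    conv_rhs => rw [buildAGo]
    simp [h]

theorem L_char (s : List Char) (n : Nat) :
    ∀ j mask, buildAGo s n false false false true false j mask
      = buildAGo s n false false false false false (scanQuoted s n '\'' j)
          (maskRange mask j (scanQuoted s n '\'' j)) := by
  intro j
  induction hfuel : n - j using Nat.strong_induction_on generalizing j with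
  | _ f ih =>
  intro mask
  by_cases h : j < n
  · by_cases hb : pyAt s j = '\\'
    · have hfind : scanQuoted s n '\'' j = scanQuoted s n '\'' (j + 2) := by
        rw [scanQuoted]; simp [h, hb]
      conv_lhs => rw [buildAGo]; simp [h, hb]
      by_cases h2 : j + 1 < n
      · conv_lhs => rw [buildAGo]; simp [h2]
        rw [ih (n - (j + 1 + 1)) (by omega) (j + 1 + 1) rfl ((mask.set j false).set (j + 1) false)]
        have h12 : j + 1 + 1 = j + 2 := by omega
        rw [h12, hfind]
        have hje : j + 1 < scanQuoted s n '\'' (j + 2) := by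
          rcases scanQuoted_ge s n '\'' (j + 2) with hg | hg <;> omega
        conv_rhs => rw [maskRange_succ _ _ _ (by omega : j < scanQuoted s n '\'' (j + 2)),
          maskRange_succ _ _ _ hje]
      · have h3 : ¬ (j + 2 < n) := by omega
        have he : scanQuoted s n '\'' (j + 2) = n := by
          rw [scanQuoted, dif_neg h3]
        rw [hfind, he]
        conv_lhs => rw [buildAGo]
        rw [dif_neg (show ¬ (j + 1 < n) from h2)]
        conv_rhs => rw [buildAGo]
        rw [dif_neg (show ¬ (n < n) by omega)]
        rw [maskRange_succ _ _ _ (by omega), maskRange_empty _ _ _ (by omega)]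
    · by_cases hq : pyAt s j = '\''
      · have hfind : scanQuoted s n '\'' j = j + 1 := by
          rw [scanQuoted]; simp [h, hq]
        rw [hfind]
        conv_lhs => rw [buildAGo]; simp [h, hb, hq]
        rw [maskRange_succ _ _ _ (by omega), maskRange_empty _ _ _ (by omega)]
      · have hfind : scanQuoted s n '\'' j = scanQuoted s n '\'' (j + 1) := by
          rw [scanQuoted]; simp [h, hb, hq]
        conv_lhs => rw [buildAGo]; simp [h, hb, hq]
        rw [ih (n - (j + 1)) (by omega) (j + 1) rfl (mask.set j false)]
        rw [hfind]
        have hje : j < scanQuoted s n '\'' (j + 1) := by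
          rcases scanQuoted_ge s n '\'' (j + 1) with hg | hg <;> omega
        conv_rhs => rw [maskRange_succ _ _ _ hje]
  · have hfind : scanQuoted s n '\'' j = n := by
      rw [scanQuoted, dif_neg h]
    rw [hfind]
    rw [maskRange_empty _ _ _ (by omega)]
    conv_lhs => rw [buildAGo]
    conv_rhs => rw [buildAGo]
    simp [h]

theorem main_go (s : List Char) (n : Nat) :
    ∀ j mask, buildAGo s n false false false false false j mask = buildBGo s n j mask := by
  intro j
  induction hfuel : n - j using Nat.strong_induction_on generalizing j with
  | _ f ih =>
  intro mask
  by_cases h : j < n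
  · by_cases c1 : pyAt s j = '/' ∧ j + 1 < n ∧ pyAt s (j + 1) = '/'
    · obtain ⟨a1, a2, a3⟩ := c1
      conv_lhs => rw [buildAGo]; simp [h, a1, a2, a3]
      rw [L_single s n (j + 2)]
      have hje : j + 1 < (findCharFrom s n '\n' (j + 2)).elim n (· + 1) := by
        rcases hf2 : findCharFrom s n '\n' (j + 2) with _ | k
        · simp only [Option.elim]; omega
        · have := findCharFrom_ge s n '\n' (j + 2) k hf2
          simp only [Option.elim]; omega
      rw [ih (n - ((findCharFrom s n '\n' (j + 2)).elim n (· + 1))) (by omega)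
        ((findCharFrom s n '\n' (j + 2)).elim n (· + 1)) rfl]
      conv_rhs => rw [buildBGo]; simp [h, a1, a2, a3]
      conv_rhs => rw [maskRange_succ _ _ _ (by omega : j < (findCharFrom s n '\n' (j + 2)).elim n (· + 1)),
        maskRange_succ _ _ _ hje]
    · by_cases c2 : pyAt s j = '/' ∧ j + 1 < n ∧ pyAt s (j + 1) = '*'
      · obtain ⟨a1, a2, a3⟩ := c2
        conv_lhs => rw [buildAGo]; simp [h, a1, a2, a3]
        rw [L_multi s n (j + 2)]
        have hje : j + 1 < (findPairFrom s n '*' '/' (j + 2)).elim n (· + 2) := by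
          rcases hf2 : findPairFrom s n '*' '/' (j + 2) with _ | k
          · simp only [Option.elim]; omega
          · have := findPairFrom_ge s n '*' '/' (j + 2) k hf2
            simp only [Option.elim]; omega
        rw [ih (n - ((findPairFrom s n '*' '/' (j + 2)).elim n (· + 2))) (by omega)
          ((findPairFrom s n '*' '/' (j + 2)).elim n (· + 2)) rfl]
        conv_rhs => rw [buildBGo]; simp [h, a1, a2, a3]
        conv_rhs => rw [maskRange_succ _ _ _ (by omega : j < (findPairFrom s n '*' '/' (j + 2)).elim n (· + 2)),
          maskRange_succ _ _ _ hje]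
      · by_cases cq : pyAt s j = '"'
        · conv_lhs => rw [buildAGo]; simp [h, cq]
          rw [L_string s n (j + 1)]
          have hje : j < scanQuoted s n '"' (j + 1) := by
            rcases scanQuoted_ge s n '"' (j + 1) with hg | hg <;> omega
          rw [ih (n - scanQuoted s n '"' (j + 1)) (by omega) (scanQuoted s n '"' (j + 1)) rfl]
          conv_rhs => rw [buildBGo]; simp [h, cq]
          conv_rhs => rw [maskRange_succ _ _ _ hje]
        · by_cases cc : pyAt s j = '\''
          · conv_lhs => rw [buildAGo]; simp [h, cq, cc]
            rw [L_char s n (j + 1)]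
            have hje : j < scanQuoted s n '\'' (j + 1) := by
              rcases scanQuoted_ge s n '\'' (j + 1) with hg | hg <;> omega
            rw [ih (n - scanQuoted s n '\'' (j + 1)) (by omega) (scanQuoted s n '\'' (j + 1)) rfl]
            conv_rhs => rw [buildBGo]; simp [h, cq, cc]
            conv_rhs => rw [maskRange_succ _ _ _ hje]
          · by_cases h2 : j + 1 < n
            · have hn1 : ¬(pyAt s j = '/' ∧ pyAt s (j + 1) = '/') := fun ab => c1 ⟨ab.1, h2, ab.2⟩
              have hn2 : ¬(pyAt s j = '/' ∧ pyAt s (j + 1) = '*') := fun ab => c2 ⟨ab.1, h2, ab.2⟩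
              conv_lhs => rw [buildAGo]; simp [h, h2, hn1, hn2, cq, cc]
              conv_rhs => rw [buildBGo]; simp [h, c1, c2, cq, cc]
              exact ih (n - (j + 1)) (by omega) (j + 1) rfl mask
            · conv_lhs => rw [buildAGo]; simp [h, h2, cq, cc]
              conv_rhs => rw [buildBGo]; simp [h, c1, c2, cq, cc]
              exact ih (n - (j + 1)) (by omega) (j + 1) rfl mask
  · conv_lhs => rw [buildAGo]
    conv_rhs => rw [buildBGo]
    simp [h]

-- ===== VERDICT (by name: the statement is the Claim_ definition above) =====
theorem build_code_mask_py_spec : Claim_equal_build_code_mask_py := by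
  intro text _
  unfold Spec_build_code_mask_py build_code_mask_py build_code_mask_py_alt
  exact main_go _ _ 0 _
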